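-- pv_equiv track=rewrite | github.com/cuiqui/nice-bot | bot/eloAOE.py | get_trimmed_xLabels
-- ===== SOURCE A (Python) =====
-- def get_trimmed_xLabels(xLabels):
--     # When there are too many xLabels, consecutive ones will be skipped to avoid overlapping
--     # Ensures there's a distance of n steps between labels
--
--     maxReadableLabels = 20
--     labelsCount = len(xLabels)
--     if (labelsCount <= maxReadableLabels):
--         return xLabels
--     newLabels = []
--     stepSize = int(labelsCount / maxReadableLabels)
--     for i in range(0,len(xLabels)):
--         if not (i % stepSize == 0):
--             newLabels.append('')
--         else:
--             newLabels.append(xLabels[i])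
--     return newLabels
-- ===== SOURCE B (Python) =====
-- def get_trimmed_xLabels(xLabels):
--     # Build the output chunk by chunk: each kept label followed by its run of blanks.
--     maxReadableLabels = 20
--     labelsCount = len(xLabels)
--     if labelsCount <= maxReadableLabels:
--         return xLabels
--     stepSize = labelsCount // maxReadableLabels
--     newLabels = []
--     i = 0
--     while i < labelsCount:
--         newLabels.append(xLabels[i])
--         newLabels.extend([''] * (min(i + stepSize, labelsCount) - i - 1))
--         i += stepSize
--     return newLabels
-- ===== Notes on version B (the rewrite author's own statement) =====
-- stated objective: alternative
-- what changed: Instead of visiting every index and testing i % stepSize to decide blank vs kept, B builds the output chunk by chunk with a while loop that jumps by stepSize, appending each kept label followed by its run of blanks.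
import Mathlib
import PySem

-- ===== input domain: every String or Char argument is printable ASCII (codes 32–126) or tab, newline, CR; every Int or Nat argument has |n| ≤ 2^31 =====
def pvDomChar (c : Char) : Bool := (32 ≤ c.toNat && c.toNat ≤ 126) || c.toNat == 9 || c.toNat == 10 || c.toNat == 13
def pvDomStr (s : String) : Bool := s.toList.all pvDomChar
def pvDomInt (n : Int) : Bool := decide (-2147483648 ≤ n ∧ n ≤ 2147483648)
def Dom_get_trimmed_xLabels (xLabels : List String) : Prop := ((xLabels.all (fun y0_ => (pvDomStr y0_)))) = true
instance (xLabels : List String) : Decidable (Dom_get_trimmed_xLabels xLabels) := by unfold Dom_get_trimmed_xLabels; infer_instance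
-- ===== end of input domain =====

-- B builds the output chunk by chunk (kept label, then its run of blanks) with a stride-stepSize loop
-- instead of testing i % stepSize at every index (objective: alternative, same O(n) cost).

-- ===== PORT A =====
-- int(labelsCount / 20) is float division then truncation; for 0 ≤ labelsCount the float
-- quotient's rounding error is far below 1 at any list length, so it equals floor division,
-- ported exactly as PySem.Int.floordiv.
def get_trimmed_xLabels (xLabels : List String) : List String :=
  let maxReadableLabels : Int := 20
  let labelsCount : Int := xLabels.length
  if labelsCount ≤ maxReadableLabels then xLabels
  else
    let stepSize : Int := PySem.Int.floordiv labelsCount maxReadableLabels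
    (PySem.List.pyRange 0 (xLabels.length : Int) 1).foldl
      (fun newLabels i =>
        if ¬ (PySem.Int.mod i stepSize = 0) then newLabels ++ [""]
        else newLabels ++ [PySem.List.pyGetD xLabels i ""]) []

-- ===== PORT B =====
-- the 'stepSize = 0' disjunct only makes the recursion total; B's Python reaches this loop
-- only with stepSize ≥ 1 (labelsCount > 20).
def pvChunkLoop (xLabels : List String) (labelsCount stepSize i : Nat)
    (newLabels : List String) : List String :=
  if h : stepSize = 0 ∨ labelsCount ≤ i then newLabels
  else
    pvChunkLoop xLabels labelsCount stepSize (i + stepSize)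
      (newLabels ++ xLabels.getD i "" :: List.replicate (min (i + stepSize) labelsCount - i - 1) "")
termination_by labelsCount - i
decreasing_by push_neg at h; omega

def get_trimmed_xLabels_alt (xLabels : List String) : List String :=
  let maxReadableLabels : Nat := 20
  let labelsCount : Nat := xLabels.length
  if labelsCount ≤ maxReadableLabels then xLabels
  else pvChunkLoop xLabels labelsCount (labelsCount / maxReadableLabels) 0 []

-- ===== PRECONDITION & SPEC =====
def Spec_get_trimmed_xLabels (xLabels : List String) (out : List String) : Prop := out = get_trimmed_xLabels_alt xLabels
instance (xLabels : List String) (out : List String) : Decidable (Spec_get_trimmed_xLabels xLabels out) := by unfold Spec_get_trimmed_xLabels; infer_instance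

-- ===== CLAIM (what is proved, stated in full; the proofs are below) =====
def Claim_equal_get_trimmed_xLabels : Prop := ∀ (xLabels : List String), Dom_get_trimmed_xLabels xLabels → Spec_get_trimmed_xLabels xLabels (get_trimmed_xLabels xLabels)

-- ===== LEMMAS AND PROOFS =====

-- the per-index value A appends (Nat form)
def pvKeep (xLabels : List String) (step j : Nat) : String :=
  if j % step ≠ 0 then "" else xLabels.getD j ""

-- one chunk of indices, mapped through pvKeep, is a kept label followed by blanks
theorem pv_map_chunk (xLabels : List String) (step i m : Nat)
    (hi : i % step = 0) (hm : 1 ≤ m) (hms : m ≤ step) :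
    (List.range' i m).map (pvKeep xLabels step) =
      xLabels.getD i "" :: List.replicate (m - 1) "" := by
  obtain ⟨m', rfl⟩ : ∃ m', m = m' + 1 := ⟨m - 1, by omega⟩
  rw [List.range'_succ, List.map_cons]
  congr 1
  · simp [pvKeep, hi]
  · simp only [Nat.add_sub_cancel]
    rw [List.eq_replicate_iff]
    refine ⟨by simp, ?_⟩
    intro s hsmem
    simp only [List.mem_map] at hsmem
    obtain ⟨j, hj, rfl⟩ := hsmem
    rw [List.mem_range'_1] at hj
    obtain ⟨q, rfl⟩ := Nat.dvd_of_mod_eq_zero hi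
    have hjm : j % step = (j - step * q) % step := by
      conv_lhs => rw [show j = step * q + (j - step * q) by omega]
      rw [Nat.mul_add_mod]
    have : (j - step * q) % step = j - step * q := Nat.mod_eq_of_lt (by omega)
    simp [pvKeep, hjm, this]
    omega

-- the chunk loop unrolled: it appends the pvKeep image of all remaining indices
theorem pv_chunkLoop_eq (xLabels : List String) (n step : Nat) (hs : step ≠ 0) :
    ∀ (d i : Nat) (out : List String), n - i ≤ d → i % step = 0 →
      pvChunkLoop xLabels n step i out = out ++ (List.range' i (n - i)).map (pvKeep xLabels step) := by
  intro d
  induction d with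
  | zero =>
    intro i out hd hi
    have hni : n ≤ i := by omega
    rw [pvChunkLoop, dif_pos (Or.inr hni)]
    simp [Nat.sub_eq_zero_of_le hni]
  | succ d ih =>
    intro i out hd hi
    by_cases hni : n ≤ i
    · rw [pvChunkLoop, dif_pos (Or.inr hni)]
      simp [Nat.sub_eq_zero_of_le hni]
    · push_neg at hni
      rw [pvChunkLoop, dif_neg (by omega)]
      rw [ih (i + step) _ (by omega) (by rw [Nat.add_mod_right]; exact hi)]
      have hm : n - i = min (i + step) n - i + (n - (i + step)) := by omega
      rw [hm, ← List.range'_append_1]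
      have hmin : i + (min (i + step) n - i) = min (i + step) n := by omega
      rw [List.map_append, hmin]
      rw [pv_map_chunk xLabels step i _ hi (by omega) (by omega)]
      have hstart : List.range' (min (i + step) n) (n - (i + step)) =
          List.range' (i + step) (n - (i + step)) := by
        by_cases hc : i + step ≤ n
        · rw [min_eq_left hc]
        · have : n - (i + step) = 0 := by omega
          simp [this]
      rw [hstart, List.append_assoc]

theorem get_trimmed_xLabels_eq (xLabels : List String) :
    get_trimmed_xLabels xLabels = get_trimmed_xLabels_alt xLabels := by
  unfold get_trimmed_xLabels get_trimmed_xLabels_alt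
  by_cases hle : xLabels.length ≤ 20
  · simp [hle, show (xLabels.length : Int) ≤ 20 by exact_mod_cast hle]
  · push_neg at hle
    rw [if_neg (by exact_mod_cast not_le.mpr (by exact_mod_cast hle : (20:Int) < xLabels.length)),
        if_neg (by omega)]
    set n := xLabels.length with hn
    set step : Nat := n / 20 with hstep
    have hs : step ≠ 0 := by
      have : 1 ≤ n / 20 := (Nat.one_le_div_iff (by norm_num)).mpr (by omega)
      omega
    -- A's Int stepSize is the Nat one
    have hstepInt : PySem.Int.floordiv (n : Int) 20 = (step : Int) := by
      exact_mod_cast PySem.Int.floordiv_natCast n 20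
    -- A side: fold-append is a map over range n
    rw [hstepInt]
    have hfa : (fun (newLabels : List String) i =>
        if ¬ (PySem.Int.mod i (step : Int) = 0) then newLabels ++ [""]
        else newLabels ++ [PySem.List.pyGetD xLabels i ""]) =
        fun acc i => acc ++ [if ¬ (PySem.Int.mod i (step : Int) = 0) then ""
          else PySem.List.pyGetD xLabels i ""] := by
      funext acc i; split_ifs <;> rfl
    simp only [hfa]
    rw [PySem.List.foldl_append_singleton_eq_map,
        PySem.List.pyRange_zero_natCast, List.map_map]
    have hbody : ((fun i => if ¬PySem.Int.mod i (step : Int) = 0 then ""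
          else PySem.List.pyGetD xLabels i "") ∘ fun (k : Nat) => (k : Int)) =
        pvKeep xLabels step := by
      funext k
      simp only [Function.comp_apply, pvKeep, PySem.Int.mod_natCast, PySem.List.pyGetD_natCast]
      norm_cast
    rw [hbody]
    -- B side
    rw [pv_chunkLoop_eq xLabels n step hs n 0 [] (by omega) (Nat.zero_mod step)]
    simp [List.range_eq_range']

-- ===== VERDICT (by name: the statement is the Claim_ definition above) =====
theorem get_trimmed_xLabels_spec : Claim_equal_get_trimmed_xLabels := by
  intro xLabels _
  unfold Spec_get_trimmed_xLabels
  exact get_trimmed_xLabels_eq xLabels
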